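-- pv_equiv track=rewrite | github.com/abrahamjroy/ProcessedElectricSheepDreams | app.py | check_nsfw_content
-- ===== SOURCE A (Python) =====
-- def check_nsfw_content(text):
--     """Check if text contains NSFW keywords. Returns True if NSFW content detected."""
--     nsfw_keywords = [
--         # Explicit terms
--         'nude', 'naked', 'nipple', 'breast', 'boob', 'tit', 'vagina',
--         'pussy', 'penis', 'dick', 'cock', 'sex', 'sexual', 'porn',
--         'nsfw', 'xxx', 'explicit', 'erotic', 'genitals', 'topless',
--         'bottomless', 'underwear exposed', 'bra visible', 'panties',
--         # Add more as needed
--         'fellatio', 'cunnilingus', 'intercourse', 'masturbat',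
--         'orgasm', 'arousal', 'hentai', 'ahegao', 'lewd',
--         'nudity', 'undressed', 'unclothed', 'provocative pose'
--     ]
--
--     text_lower = text.lower()
--     for keyword in nsfw_keywords:
--         if keyword in text_lower:
--             return True
--     return False
-- ===== SOURCE B (Python) =====
-- NSFW_KEYWORDS = [
--     'nude', 'naked', 'nipple', 'breast', 'boob', 'tit', 'vagina',
--     'pussy', 'penis', 'dick', 'cock', 'sex', 'sexual', 'porn',
--     'nsfw', 'xxx', 'explicit', 'erotic', 'genitals', 'topless',
--     'bottomless', 'underwear exposed', 'bra visible', 'panties',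
--     'fellatio', 'cunnilingus', 'intercourse', 'masturbat',
--     'orgasm', 'arousal', 'hentai', 'ahegao', 'lewd',
--     'nudity', 'undressed', 'unclothed', 'provocative pose'
-- ]
--
-- # index the keywords once by their first character
-- _BUCKETS = {}
-- for _k in NSFW_KEYWORDS:
--     _BUCKETS[_k[0]] = _BUCKETS.get(_k[0], []) + [_k]
--
-- def check_nsfw_content(text):
--     """Check if text contains NSFW keywords. Returns True if NSFW content detected."""
--     t = text.lower()
--     for i, c in enumerate(t):
--         for k in _BUCKETS.get(c, []):
--             if t.startswith(k, i):
--                 return True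
--     return False
-- ===== Notes on version B (the rewrite author's own statement) =====
-- stated objective: alternative
-- what changed: B builds a dict indexing keywords by first character once, then does a single position-major scan of the lowered text testing only the keywords bucketed under the current character, instead of A's keyword-major loop of 37 separate whole-string substring searches.
import Mathlib
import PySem

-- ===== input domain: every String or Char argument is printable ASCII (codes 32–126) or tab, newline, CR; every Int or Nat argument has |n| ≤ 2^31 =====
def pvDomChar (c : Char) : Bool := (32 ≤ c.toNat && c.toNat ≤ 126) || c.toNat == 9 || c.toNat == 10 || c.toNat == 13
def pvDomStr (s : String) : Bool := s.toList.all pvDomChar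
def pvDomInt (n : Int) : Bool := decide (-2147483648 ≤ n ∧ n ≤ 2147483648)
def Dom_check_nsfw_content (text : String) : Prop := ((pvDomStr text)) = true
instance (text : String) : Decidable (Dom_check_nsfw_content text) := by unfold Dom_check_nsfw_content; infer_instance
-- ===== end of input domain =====

-- B indexes the keywords by first character in a dict built once and scans the lowered text
-- position by position, testing only the keywords in the current character's bucket (alternative, not faster).

-- the keyword list shared verbatim by both programs
def nsfwKeywords : List String := [
  "nude", "naked", "nipple", "breast", "boob", "tit", "vagina",
  "pussy", "penis", "dick", "cock", "sex", "sexual", "porn",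
  "nsfw", "xxx", "explicit", "erotic", "genitals", "topless",
  "bottomless", "underwear exposed", "bra visible", "panties",
  "fellatio", "cunnilingus", "intercourse", "masturbat",
  "orgasm", "arousal", "hentai", "ahegao", "lewd",
  "nudity", "undressed", "unclothed", "provocative pose"]

-- ===== PORT A =====
-- A's loop: for keyword in nsfw_keywords: if keyword in text_lower: return True
def aLoop (tl : List Char) : List String → Bool
  | [] => false
  | k :: rest => if PySem.Chars.isIn k.toList tl then true else aLoop tl rest

def check_nsfw_content (text : String) : Bool :=
  aLoop (PySem.Str.lower text).toList nsfwKeywords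

-- ===== PORT B =====
-- k[0]: exact here because every keyword in the literal list is nonempty, so pyGet? is always some
def firstChar (k : String) : Char := (PySem.Str.pyGet? k 0).getD ' '

-- _BUCKETS built by: for _k in NSFW_KEYWORDS: _BUCKETS[_k[0]] = _BUCKETS.get(_k[0], []) + [_k]
def nsfwBuckets : PySem.Dict Char (List String) :=
  nsfwKeywords.foldl
    (fun d k => d.insert (firstChar k) (d.getD (firstChar k) [] ++ [k]))
    PySem.Dict.empty

-- for i, c in enumerate(t): for k in _BUCKETS.get(c, []): if t.startswith(k, i): return True
def bScan : List Char → Bool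
  | [] => false
  | c :: rest =>
      if (nsfwBuckets.getD c []).any (fun k => PySem.Chars.startswith (c :: rest) k.toList) then true
      else bScan rest

def check_nsfw_content_alt (text : String) : Bool :=
  bScan (PySem.Str.lower text).toList

-- ===== PRECONDITION & SPEC =====
def Spec_check_nsfw_content (text : String) (out : Bool) : Prop := out = check_nsfw_content_alt text
instance (text : String) (out : Bool) : Decidable (Spec_check_nsfw_content text out) := by unfold Spec_check_nsfw_content; infer_instance

-- ===== CLAIM =====
def Claim_equal_check_nsfw_content : Prop := ∀ (text : String), Dom_check_nsfw_content text → Spec_check_nsfw_content text (check_nsfw_content text)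

-- ===== LEMMAS AND PROOFS =====

theorem aLoop_eq_any (tl : List Char) (kws : List String) :
    aLoop tl kws = kws.any (fun k => PySem.Chars.isIn k.toList tl) := by
  induction kws with
  | nil => rfl
  | cons k rest ih =>
      simp only [aLoop, List.any_cons, ih]
      by_cases h : PySem.Chars.isIn k.toList tl = true <;> simp [h]

theorem getD_bucketFold (kws : List String) (d : PySem.Dict Char (List String)) (c : Char) :
    (kws.foldl (fun d k => d.insert (firstChar k) (d.getD (firstChar k) [] ++ [k])) d).getD c []
      = d.getD c [] ++ kws.filter (fun k => firstChar k = c) := by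
  induction kws generalizing d with
  | nil => simp
  | cons k rest ih =>
      simp only [List.foldl_cons, ih, PySem.Dict.getD_insert, List.filter_cons]
      by_cases h : c = firstChar k
      · simp [h, List.append_assoc]
      · have h' : ¬ (firstChar k = c) := fun hh => h hh.symm
        simp [h, h']

theorem any_filter_of_imp (l : List String) (p P : String → Bool)
    (h : ∀ k ∈ l, P k = true → p k = true) : (l.filter p).any P = l.any P := by
  induction l with
  | nil => rfl
  | cons a l ih =>
      have hl : ∀ k ∈ l, P k = true → p k = true := fun k hk => h k (List.mem_cons_of_mem a hk)
      by_cases hp : p a = true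
      · simp only [List.filter_cons, hp, if_pos, List.any_cons, ih hl]
      · have hPa : P a = false := by
          cases hPa : P a with
          | false => rfl
          | true => exact absurd (h a (List.mem_cons_self) hPa) hp
        have hfa : p a = false := by simpa using hp
        simp only [List.filter_cons, hfa, Bool.false_eq_true, if_false, List.any_cons, hPa,
          Bool.false_or, ih hl]

theorem startswith_firstChar {c : Char} {rest : List Char} {k : String}
    (hne : k.toList ≠ [])
    (h : PySem.Chars.startswith (c :: rest) k.toList = true) : firstChar k = c := by
  rw [PySem.Chars.startswith_iff] at h
  cases hkl : k.toList with
  | nil => exact absurd hkl hne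
  | cons a t =>
      rw [hkl] at h
      obtain ⟨s, hs⟩ := h
      have ha : a = c := by
        have := congrArg (fun l => l.head?) hs
        simpa using this
      simp [firstChar, hkl, ha]

theorem bucketAny (c : Char) (rest : List Char) :
    (nsfwBuckets.getD c []).any (fun k => PySem.Chars.startswith (c :: rest) k.toList)
      = nsfwKeywords.any (fun k => PySem.Chars.startswith (c :: rest) k.toList) := by
  have hb : nsfwBuckets.getD c []
      = nsfwKeywords.filter (fun k => firstChar k = c) := by
    unfold nsfwBuckets
    rw [getD_bucketFold]
    simp
  rw [hb]
  apply any_filter_of_imp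
  intro k hk hP
  have hne : k.toList ≠ [] := by
    have hall := List.all_eq_true.mp
      (by decide : nsfwKeywords.all (fun k => decide (k.toList ≠ [])) = true) k hk
    simpa using hall
  simpa using startswith_firstChar hne hP

theorem any_or_eq (l : List String) (p q : String → Bool) :
    (l.any fun a => p a || q a) = (l.any p || l.any q) := by
  induction l with
  | nil => rfl
  | cons a l ih =>
      simp only [List.any_cons, ih]
      cases p a <;> cases q a <;> simp

theorem isIn_cons_eq (k : List Char) (c : Char) (rest : List Char) :
    PySem.Chars.isIn k (c :: rest)
      = (PySem.Chars.startswith (c :: rest) k || PySem.Chars.isIn k rest) := by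
  rcases h : PySem.Chars.isIn k (c :: rest) with _ | _
  · rw [PySem.Chars.isIn_eq_false_iff] at h
    symm
    simp only [Bool.or_eq_false_iff]
    constructor
    · rcases hs : PySem.Chars.startswith (c :: rest) k with _ | _
      · rfl
      · exact absurd (List.IsPrefix.isInfix ((PySem.Chars.startswith_iff _ _).mp hs)) h
    · rw [PySem.Chars.isIn_eq_false_iff]
      exact fun hi => h (List.infix_cons hi)
  · rw [PySem.Chars.isIn_iff_infix, List.infix_cons_iff] at h
    rcases h with h | h
    · rw [← PySem.Chars.startswith_iff] at h
      simp [h]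
    · rw [← PySem.Chars.isIn_iff_infix] at h
      simp [h]

theorem bScan_eq_any (s : List Char) :
    bScan s = nsfwKeywords.any (fun k => PySem.Chars.isIn k.toList s) := by
  induction s with
  | nil => decide
  | cons c rest ih =>
      simp only [bScan, bucketAny, ih, isIn_cons_eq, any_or_eq]
      cases nsfwKeywords.any (fun k => PySem.Chars.startswith (c :: rest) k.toList) <;> simp

-- ===== VERDICT =====
theorem check_nsfw_content_spec : Claim_equal_check_nsfw_content := by
  intro text _
  unfold Spec_check_nsfw_content check_nsfw_content check_nsfw_content_alt
  rw [aLoop_eq_any, bScan_eq_any]
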